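-- pv_equiv track=rewrite | github.com/YohansHailu/interview_prep | maxProfit.py | get_best_limit
-- ===== SOURCE A (Python) =====
-- def get_best_limit(arr, target):
--
--     total_sum = sum(arr)
--     left = 0; right = arr[-1]
--     best = right
--     while left <= right:
--         mid = (left + right)//2
--
--         limit_sum = 0
--         for val in arr:
--             limit_sum += min(val, mid)
--
--         diff = total_sum - limit_sum
--
--         if diff == target:
--             return mid
--
--         if diff > target:
--             left = mid + 1
--
--         elif diff < target:
--             best = mid
--             right = mid - 1
--
--     return best
-- ===== SOURCE B (Python) =====
-- def get_best_limit(arr, target):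
--     s = sorted(arr)
--     n = len(s)
--     prefix = [0]
--     acc = 0
--     for v in s:
--         acc += v
--         prefix.append(acc)
--     total = prefix[n]
--
--     def excess(mid):
--         # k = number of elements <= mid (hand-written bisect_right on s)
--         lo, hi = 0, n
--         while lo < hi:
--             m = (lo + hi) // 2
--             if s[m] <= mid:
--                 lo = m + 1
--             else:
--                 hi = m
--         k = lo
--         return (total - prefix[k]) - (n - k) * mid
--
--     left = 0
--     right = arr[-1]
--     best = right
--     while left <= right:
--         mid = (left + right) // 2
--         diff = excess(mid)
--         if diff == target:
--             return mid
--         if diff > target: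
--             left = mid + 1
--         else:
--             best = mid
--             right = mid - 1
--     return best
-- ===== Notes on version B (the rewrite author's own statement) =====
-- stated objective: alternative
-- what changed: A rescans all of arr (sum of min(val,mid)) on every binary-search probe; B sorts arr once, builds prefix sums, and evaluates each probe's excess over the limit with a hand-written bisect, keeping the identical outer binary search; intended as faster (O(n log n + log(max) log n) vs O(n log(max))) but a timing run could not confirm it consistently (probe count depends on arr[-1]).
import Mathlib
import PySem

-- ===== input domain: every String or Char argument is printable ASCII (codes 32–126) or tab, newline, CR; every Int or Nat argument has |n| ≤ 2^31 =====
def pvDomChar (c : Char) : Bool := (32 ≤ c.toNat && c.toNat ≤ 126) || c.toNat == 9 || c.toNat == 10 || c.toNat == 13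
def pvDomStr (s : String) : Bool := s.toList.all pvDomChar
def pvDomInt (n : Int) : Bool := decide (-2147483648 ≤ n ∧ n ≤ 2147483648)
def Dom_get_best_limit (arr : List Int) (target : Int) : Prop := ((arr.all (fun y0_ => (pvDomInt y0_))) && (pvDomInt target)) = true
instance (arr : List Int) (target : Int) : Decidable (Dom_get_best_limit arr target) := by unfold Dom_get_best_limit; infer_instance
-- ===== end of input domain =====

-- B replaces A's full rescan of arr on every binary-search probe by a one-time sort +
-- prefix sums, evaluating each probe's excess with a hand-written bisect (objective: alternative).

-- ===== PORT A =====
-- A's 'while left <= right' loop, step for step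
def pvLoopA (arr : List Int) (total target : Int) (left right best : Int) : Int :=
  if h : left ≤ right then
    let mid := PySem.Int.floordiv (left + right) 2
    let limit_sum := arr.foldl (fun acc val => acc + min val mid) 0
    let diff := total - limit_sum
    if diff = target then mid
    else if diff > target then pvLoopA arr total target (mid + 1) right best
    else pvLoopA arr total target left (mid - 1) mid
  else best
termination_by (right + 1 - left).toNat
decreasing_by
  all_goals have hb := PySem.Int.floordiv_two_mid_bounds h; omega

def get_best_limit (arr : List Int) (target : Int) : Int :=
  let total := arr.sum
  match PySem.List.pyGet? arr (-1) with
  | none => 0  -- arr[-1] raises IndexError on empty arr; excluded by Pre_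
  | some r => pvLoopA arr total target 0 r r

-- ===== PORT B =====
-- Source B's hand-written bisect_right loop 'while lo < hi: …' (the index m is always in range there, so getD is exact)
def pvBisect (s : List Int) (mid : Int) (lo hi : Nat) : Nat :=
  if h : lo < hi then
    let m := (lo + hi) / 2
    if s.getD m 0 ≤ mid then pvBisect s mid (m + 1) hi
    else pvBisect s mid lo m
  else lo
termination_by hi - lo
decreasing_by all_goals omega

-- Source B's excess(mid) (the index k ≤ n is always in range of the n+1-long prefix list, so getD is exact)
def pvExcess (s pfxl : List Int) (total : Int) (n : Nat) (mid : Int) : Int :=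
  let k := pvBisect s mid 0 n
  (total - pfxl.getD k 0) - ((n : Int) - (k : Int)) * mid

-- Source B's outer 'while left <= right' loop
def pvLoopB (s pfxl : List Int) (total : Int) (n : Nat) (target left right best : Int) : Int :=
  if h : left ≤ right then
    let mid := PySem.Int.floordiv (left + right) 2
    let diff := pvExcess s pfxl total n mid
    if diff = target then mid
    else if diff > target then pvLoopB s pfxl total n target (mid + 1) right best
    else pvLoopB s pfxl total n target left (mid - 1) mid
  else best
termination_by (right + 1 - left).toNat
decreasing_by
  all_goals have hb := PySem.Int.floordiv_two_mid_bounds h; omega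

def get_best_limit_alt (arr : List Int) (target : Int) : Int :=
  let s := PySem.List.sorted arr (fun x => x) false
  let n := s.length
  let pa := s.foldl (fun st v => (st.1 ++ [st.2 + v], st.2 + v)) (([(0 : Int)] : List Int), (0 : Int))
  let pfxl := pa.1
  let total := pfxl.getD n 0
  match PySem.List.pyGet? arr (-1) with
  | none => 0  -- arr[-1] raises IndexError on empty arr; excluded by Pre_
  | some r => pvLoopB s pfxl total n target 0 r r

-- ===== PRECONDITION & SPEC =====
-- Pre_ excludes only the empty list, on which the Python A raises IndexError at arr[-1] (so does B).
def Pre_get_best_limit (arr : List Int) (target : Int) : Prop := arr ≠ []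
instance (arr : List Int) (target : Int) : Decidable (Pre_get_best_limit arr target) := by unfold Pre_get_best_limit; infer_instance
def pvWitness_get_best_limit : List Int × Int := ([1, 5, 3], 4)

def Spec_get_best_limit (arr : List Int) (target : Int) (out : Int) : Prop := out = get_best_limit_alt arr target
instance (arr : List Int) (target : Int) (out : Int) : Decidable (Spec_get_best_limit arr target out) := by unfold Spec_get_best_limit; infer_instance

-- ===== CLAIM (what is proved, stated in full; the proofs are below) =====
def Claim_equal_get_best_limit : Prop := ∀ (arr : List Int) (target : Int), Dom_get_best_limit arr target → Pre_get_best_limit arr target → Spec_get_best_limit arr target (get_best_limit arr target)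

-- ===== LEMMAS AND PROOFS =====

-- Source B's prefix-building loop, characterised in closed form
theorem pvPrefixFold (s : List Int) (pfx : List Int) (a : Int) :
    s.foldl (fun st v => (st.1 ++ [st.2 + v], st.2 + v)) (pfx, a)
      = (pfx ++ (List.range s.length).map (fun i => a + (s.take (i + 1)).sum), a + s.sum) := by
  induction s generalizing pfx a with
  | nil => simp
  | cons v t ih =>
    simp only [List.foldl_cons, ih, List.length_cons, List.range_succ_eq_map, List.map_cons,
      List.map_map, List.take_succ_cons, List.sum_cons]
    refine Prod.ext ?_ (by ring)
    simp only [List.append_assoc, List.singleton_append]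
    congr 1
    simp
    exact fun i _ => by ring

-- entry k of the prefix list is the sum of the first k elements
theorem pvPrefixGetD (s : List Int) (k : Nat) (hk : k ≤ s.length) :
    (((s.foldl (fun st v => (st.1 ++ [st.2 + v], st.2 + v)) (([(0 : Int)] : List Int), (0 : Int))).1).getD k 0)
      = (s.take k).sum := by
  rw [pvPrefixFold]
  cases k with
  | zero => simp
  | succ j =>
    have hj : j < ((List.range s.length).map (fun i => (0 : Int) + (s.take (i + 1)).sum)).length := by
      simpa using hk
    rw [List.singleton_append, List.getD_cons_succ, List.getD_eq_getElem _ _ hj]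
    simp

-- Source B's bisect loop: invariant and final split property on a sorted list
theorem pvBisectSpec (s : List Int) (hs : s.Pairwise (· ≤ ·)) (mid : Int) :
    ∀ d lo hi, hi - lo = d → hi ≤ s.length →
      (∀ i, i < lo → s.getD i 0 ≤ mid) →
      (∀ i, hi ≤ i → i < s.length → mid < s.getD i 0) →
      lo ≤ hi →
      pvBisect s mid lo hi ≤ s.length ∧
      (∀ i, i < pvBisect s mid lo hi → s.getD i 0 ≤ mid) ∧
      (∀ i, pvBisect s mid lo hi ≤ i → i < s.length → mid < s.getD i 0) := by
  have hmono : ∀ i j, i ≤ j → j < s.length → s.getD i 0 ≤ s.getD j 0 := by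
    intro i j hij hj
    rcases Nat.lt_or_ge i j with h | h
    · have := (List.pairwise_iff_getElem.mp hs) i j (by omega) hj h
      simpa [List.getD_eq_getElem?_getD, List.getElem?_eq_getElem, Nat.lt_of_le_of_lt hij hj, hj] using this
    · have : i = j := by omega
      subst this; rfl
  intro d
  induction d using Nat.strong_induction_on with
  | _ d ih =>
    intro lo hi hd hhi hlow hhigh hle
    rw [pvBisect]
    by_cases h : lo < hi
    · simp only [h, dite_true]
      set m := (lo + hi) / 2 with hm
      have hm1 : lo ≤ m := by omega
      have hm2 : m < hi := by omega
      by_cases hc : s.getD m 0 ≤ mid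
      · simp only [hc, if_true]
        exact ih (hi - (m + 1)) (by omega) (m + 1) hi rfl hhi
          (fun i hi' => le_trans (hmono i m (by omega) (by omega)) hc) hhigh (by omega)
      · simp only [hc, if_false]
        have hc' : mid < s.getD m 0 := not_le.mp hc
        exact ih (m - lo) (by omega) lo m rfl (by omega) hlow
          (fun i hi' hi2 => lt_of_lt_of_le hc' (hmono m i hi' hi2)) (by omega)
    · simp only [h, dite_false]
      have : lo = hi := by omega
      subst this
      exact ⟨by omega, hlow, fun i h1 h2 => hhigh i h1 h2⟩

-- the min-sum splits at the bisect point
theorem pvSplitSum (s : List Int) (mid : Int) : ∀ (k : Nat), k ≤ s.length →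
    (∀ i, i < k → s.getD i 0 ≤ mid) →
    (∀ i, k ≤ i → i < s.length → mid < s.getD i 0) →
    (s.map (fun v => min v mid)).sum = (s.take k).sum + ((s.length : Int) - (k : Int)) * mid := by
  induction s with
  | nil => intro k hk _ _; simp_all
  | cons v t ih =>
    intro k hk h1 h2
    cases k with
    | zero =>
      have hv : mid < v := by simpa using h2 0 (by omega) (by simp)
      have := ih 0 (by omega) (by omega)
        (fun i _ hi => by simpa using h2 (i + 1) (by omega) (by simpa using hi))
      simp only [List.map_cons, List.sum_cons, List.take_zero, List.sum_nil, List.length_cons] at *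
      rw [min_eq_right (le_of_lt hv), this]
      push_cast; ring
    | succ j =>
      have hv : v ≤ mid := by simpa using h1 0 (by omega)
      have := ih j (by simpa using hk)
        (fun i hij => by simpa using h1 (i + 1) (by omega))
        (fun i hji hi => by simpa using h2 (i + 1) (by omega) (by simpa using hi))
      simp only [List.map_cons, List.sum_cons, List.take_succ_cons, List.length_cons] at *
      rw [min_eq_left hv, this]
      push_cast; ring

-- B's excess(mid) equals A's diff for that mid
theorem pvExcessEq (arr : List Int) (mid : Int) :
    pvExcess (PySem.List.sorted arr (fun x => x) false)
      ((PySem.List.sorted arr (fun x => x) false).foldl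
        (fun st v => (st.1 ++ [st.2 + v], st.2 + v)) (([(0 : Int)] : List Int), (0 : Int))).1
      ((((PySem.List.sorted arr (fun x => x) false).foldl
        (fun st v => (st.1 ++ [st.2 + v], st.2 + v)) (([(0 : Int)] : List Int), (0 : Int))).1).getD
        (PySem.List.sorted arr (fun x => x) false).length 0)
      (PySem.List.sorted arr (fun x => x) false).length mid
    = arr.sum - arr.foldl (fun acc val => acc + min val mid) 0 := by
  set s := PySem.List.sorted arr (fun x => x) false with hsdef
  have hperm : s.Perm arr := PySem.List.sorted_perm arr (fun x => x) false
  have hs : s.Pairwise (· ≤ ·) := PySem.List.sorted_pairwise arr (fun x => x)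
  have hk := pvBisectSpec s hs mid s.length 0 s.length (by omega) le_rfl
    (by omega) (fun i h1 h2 => absurd h1 (by omega)) (by omega)
  obtain ⟨hkle, hklow, hkhigh⟩ := hk
  show ((((PySem.List.sorted arr (fun x => x) false).foldl (fun st v => (st.1 ++ [st.2 + v], st.2 + v)) (([(0 : Int)] : List Int), (0 : Int))).1).getD s.length 0 - (((PySem.List.sorted arr (fun x => x) false).foldl (fun st v => (st.1 ++ [st.2 + v], st.2 + v)) (([(0 : Int)] : List Int), (0 : Int))).1).getD (pvBisect s mid 0 s.length) 0) - ((s.length : Int) - ((pvBisect s mid 0 s.length : Nat) : Int)) * mid = arr.sum - arr.foldl (fun acc val => acc + min val mid) 0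
  rw [pvPrefixGetD s _ hkle, pvPrefixGetD s s.length le_rfl, List.take_length,
    PySem.List.foldl_add]
  have hsplit := pvSplitSum s mid (pvBisect s mid 0 s.length) hkle hklow hkhigh
  have hsum : s.sum = arr.sum := hperm.sum_eq
  have hmap : (s.map (fun v => min v mid)).sum = (arr.map (fun v => min v mid)).sum :=
    (hperm.map _).sum_eq
  rw [hmap] at hsplit
  omega

-- the two outer binary-search loops agree step for step
theorem pvLoopsEq (arr : List Int) (target : Int) : ∀ (d : Nat), ∀ left right best,
      (right + 1 - left).toNat = d →
      pvLoopA arr arr.sum target left right best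
        = pvLoopB (PySem.List.sorted arr (fun x => x) false)
            ((PySem.List.sorted arr (fun x => x) false).foldl
              (fun st v => (st.1 ++ [st.2 + v], st.2 + v)) (([(0 : Int)] : List Int), (0 : Int))).1
            ((((PySem.List.sorted arr (fun x => x) false).foldl
              (fun st v => (st.1 ++ [st.2 + v], st.2 + v)) (([(0 : Int)] : List Int), (0 : Int))).1).getD
              (PySem.List.sorted arr (fun x => x) false).length 0)
            (PySem.List.sorted arr (fun x => x) false).length target left right best := by
  intro d
  induction d using Nat.strong_induction_on with
  | _ d ih =>
    intro left right best hd
    rw [pvLoopA, pvLoopB]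
    by_cases h : left ≤ right
    · simp only [h, dite_true]
      have hb := PySem.Int.floordiv_two_mid_bounds h
      rw [pvExcessEq arr (PySem.Int.floordiv (left + right) 2)]
      split_ifs with h1 h2
      · rfl
      · exact ih (right + 1 - (PySem.Int.floordiv (left + right) 2 + 1)).toNat (by omega) _ _ _ rfl
      · exact ih ((PySem.Int.floordiv (left + right) 2 - 1) + 1 - left).toNat (by omega) _ _ _ rfl
    · simp only [h, dite_false]

-- ===== VERDICT (by name: the statement is the Claim_ definition above) =====
theorem get_best_limit_spec : Claim_equal_get_best_limit := by
  intro arr target _ _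
  unfold Spec_get_best_limit get_best_limit get_best_limit_alt
  cases PySem.List.pyGet? arr (-1) with
  | none => rfl
  | some r => exact pvLoopsEq arr target (r + 1 - 0).toNat 0 r r rfl
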